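-- pv_equiv track=rewrite | github.com/Jamie793/MyCTFReverseWriteUp | CRACKME/Crack1.py | encode_pass
-- ===== SOURCE A (Python) =====
-- def encode_pass(passwd):
--     res = 0
--     for i in passwd:
--         ascii = ord(i) & 0xFF
--         ascii -= 0x30
--         res *= 0xA
--         res += ascii
--     res ^= 0x1234
--     return hex(res)
-- ===== SOURCE B (Python) =====
-- def encode_pass(passwd):
--     res = 0
--     p = 1
--     for c in reversed(passwd):
--         res += ((ord(c) & 0xFF) - 0x30) * p
--         p *= 10
--     res ^= 0x1234
--     return hex(res)
-- ===== Notes on version B (the rewrite author's own statement) =====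
-- stated objective: alternative
-- what changed: Replaces Horner's left-to-right accumulator (res*10+digit) by a right-to-left pass over reversed(passwd) that maintains an explicit power-of-ten weight p and adds digit*p; the final XOR with 0x1234 and hex formatting are unchanged.
import Mathlib
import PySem

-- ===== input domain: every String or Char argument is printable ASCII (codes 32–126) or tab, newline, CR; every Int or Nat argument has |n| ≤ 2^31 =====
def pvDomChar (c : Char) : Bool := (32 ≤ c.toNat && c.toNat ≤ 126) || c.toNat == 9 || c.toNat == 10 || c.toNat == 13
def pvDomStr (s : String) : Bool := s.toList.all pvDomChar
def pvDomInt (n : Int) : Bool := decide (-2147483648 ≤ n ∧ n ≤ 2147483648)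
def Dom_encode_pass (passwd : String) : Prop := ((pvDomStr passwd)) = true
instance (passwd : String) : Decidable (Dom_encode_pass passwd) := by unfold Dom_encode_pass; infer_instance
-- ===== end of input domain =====

-- B replaces the Horner accumulator by a reversed pass with an explicit power-of-ten weight (alternative decomposition, same cost).

-- shared helper: Python's built-in hex(n) ('0x…' lowercase, '-0x…' for negatives), ported by hand (exact for every Int)
def pyHexDigit (n : Nat) : Char :=
  if n < 10 then Char.ofNat (48 + n) else Char.ofNat (87 + n)

def pyHexNat (n : Nat) : List Char :=
  if h : n < 16 then [pyHexDigit n]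
  else pyHexNat (n / 16) ++ [pyHexDigit (n % 16)]
  decreasing_by exact Nat.div_lt_self (by omega) (by omega)

def pyHex (n : Int) : String :=
  if n < 0 then String.mk ('-' :: '0' :: 'x' :: pyHexNat (-n).toNat)
  else String.mk ('0' :: 'x' :: pyHexNat n.toNat)

-- ===== PORT A =====
def encode_pass (passwd : String) : String :=
  let res : Int := passwd.toList.foldl
    (fun res i =>
      let ascii := PySem.Int.band (i.toNat : Int) 0xFF
      let ascii := ascii - 0x30
      res * 0xA + ascii) 0
  pyHex (PySem.Int.bxor res 0x1234)

-- ===== PORT B =====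
def encode_pass_alt (passwd : String) : String :=
  let rp : Int × Int := passwd.toList.reverse.foldl
    (fun rp c => (rp.1 + (PySem.Int.band (c.toNat : Int) 0xFF - 0x30) * rp.2, rp.2 * 10))
    (0, 1)
  pyHex (PySem.Int.bxor rp.1 0x1234)

-- ===== PRECONDITION & SPEC =====
def Spec_encode_pass (passwd : String) (out : String) : Prop := out = encode_pass_alt passwd
instance (passwd : String) (out : String) : Decidable (Spec_encode_pass passwd out) := by unfold Spec_encode_pass; infer_instance

-- ===== CLAIM (what is proved, stated in full; the proofs are below) =====
def Claim_equal_encode_pass : Prop := ∀ (passwd : String), Dom_encode_pass passwd → Spec_encode_pass passwd (encode_pass passwd)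

-- ===== LEMMAS AND PROOFS =====

def pvDig (c : Char) : Int := PySem.Int.band (c.toNat : Int) 0xFF - 0x30

-- Horner shift: running the Horner loop from acc adds acc * 10^len
theorem horner_shift (l : List Char) : ∀ (a : Int),
    l.foldl (fun r c => r * 10 + pvDig c) a
      = a * 10 ^ l.length + l.foldl (fun r c => r * 10 + pvDig c) 0 := by
  induction l with
  | nil => intro a; simp
  | cons c t ih =>
    intro a
    simp only [List.foldl_cons, List.length_cons]
    rw [ih (a * 10 + pvDig c), ih (0 * 10 + pvDig c)]
    ring

-- the reversed weighted pass computes (res + p * Horner l, p * 10^len)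
theorem rev_weighted (l : List Char) : ∀ (res p : Int),
    l.reverse.foldl (fun rp c => (rp.1 + pvDig c * rp.2, rp.2 * 10)) (res, p)
      = (res + p * l.foldl (fun r c => r * 10 + pvDig c) 0, p * 10 ^ l.length) := by
  induction l with
  | nil => intro res p; simp
  | cons c t ih =>
    intro res p
    simp only [List.reverse_cons, List.foldl_append, List.foldl_cons, List.foldl_nil,
      List.length_cons, ih res p]
    rw [horner_shift t (0 * 10 + pvDig c)]
    rw [Prod.mk.injEq]; exact ⟨by ring, by ring⟩

-- ===== VERDICT (by name: the statement is the Claim_ definition above) =====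
theorem encode_pass_spec : Claim_equal_encode_pass := by
  intro passwd _
  unfold Spec_encode_pass encode_pass encode_pass_alt
  have h := rev_weighted passwd.toList 0 1
  simp only [pvDig] at h
  rw [h]
  norm_num
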